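-- pv_equiv track=rewrite | github.com/mattHawthorn/advent_of_code_2023 | src/solutions/day14.py | tilt_seq
-- ===== SOURCE A (Python) =====
-- from functools import partial
-- from itertools import accumulate, chain, cycle
-- from typing import IO, Iterable, Iterator, List, Literal, Optional, Sequence, Tuple
--
-- ROUND_ROCK = "O"
--
-- CUBE_ROCK = "#"
--
-- EMPTY = "."
--
-- def _tilt_seq_forward(seq: Sequence[str], i: int, j: int) -> Sequence[str]:
--     n_round = seq[i:j].count(ROUND_ROCK)
--     not_end = j < len(seq)
--     return [EMPTY * (j - i - n_round), ROUND_ROCK * n_round, CUBE_ROCK * not_end]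
--
-- def tilt_seq(forward: bool, seq: Sequence[str]) -> Sequence[str]:
--     if forward:
--         cube_pos = [i for i, s in enumerate(seq) if s == CUBE_ROCK]
--         return "".join(
--             chain.from_iterable(
--                 map(
--                     partial(_tilt_seq_forward, seq),
--                     chain((0,), map((1).__add__, cube_pos)),
--                     chain(cube_pos, (len(seq),)),
--                 )
--             )
--         )
--     else:
--         return tilt_seq(True, seq[::-1])[::-1]
-- ===== SOURCE B (Python) =====
-- ROUND_ROCK = "O"
-- CUBE_ROCK = "#"
-- EMPTY = "."
--
-- def tilt_seq(forward, seq):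
--     if forward:
--         # one pass: count empties/rounds per cube-delimited segment, flush at each cube
--         out = []
--         empties = 0
--         rounds = 0
--         for c in seq:
--             if c == CUBE_ROCK:
--                 out.append(EMPTY * empties + ROUND_ROCK * rounds + CUBE_ROCK)
--                 empties = 0
--                 rounds = 0
--             elif c == ROUND_ROCK:
--                 rounds += 1
--             else:
--                 empties += 1
--         out.append(EMPTY * empties + ROUND_ROCK * rounds)
--         return "".join(out)
--     else:
--         return tilt_seq(True, seq[::-1])[::-1]
-- ===== Notes on version B (the rewrite author's own statement) =====
-- stated objective: alternative
-- what changed: A precomputes all cube positions via enumerate, pairs them into segment bounds, and counts round rocks in each slice; B makes a single left-to-right pass keeping per-segment empty/round counters and flushing them at each cube.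
import Mathlib
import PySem

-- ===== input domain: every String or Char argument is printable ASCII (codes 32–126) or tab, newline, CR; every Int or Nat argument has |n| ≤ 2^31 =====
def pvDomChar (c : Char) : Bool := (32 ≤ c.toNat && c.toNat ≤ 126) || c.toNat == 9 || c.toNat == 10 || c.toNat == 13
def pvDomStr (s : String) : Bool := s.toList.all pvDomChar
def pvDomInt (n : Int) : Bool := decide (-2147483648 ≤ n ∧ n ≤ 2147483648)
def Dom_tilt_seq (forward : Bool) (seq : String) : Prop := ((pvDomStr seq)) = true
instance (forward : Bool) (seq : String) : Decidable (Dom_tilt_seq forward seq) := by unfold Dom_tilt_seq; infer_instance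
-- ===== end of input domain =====

-- B replaces A's cube-position/slice/count partition by a single left-to-right pass with
-- per-segment counters (objective: alternative single-pass decomposition).


-- ===== PORT A =====
-- _tilt_seq_forward(seq, i, j) = ["."*(j-i-n_round), "O"*n_round, "#"*not_end]
-- ('str * int' is PySem.List.pyRepeat on the char list; seq[i:j].count("O") for the
--  one-character needle "O" is exactly the character count of the slice)
def pvTiltFwdSeg (s : List Char) (i j : Int) : List (List Char) :=
  let n_round : Int := ((PySem.List.slice s (some i) (some j)).count 'O' : Int)
  let not_end : Bool := decide (j < (s.length : Int))
  [PySem.List.pyRepeat ['.'] (j - i - n_round),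
   PySem.List.pyRepeat ['O'] n_round,
   PySem.List.pyRepeat ['#'] (if not_end then 1 else 0)]

-- forward branch of A: cube positions, then "".join of the chained mapped segments
-- (map over two iterators = zipWith; chain.from_iterable + "".join = the two flattens)
def pvTiltFwdA (s : List Char) : List Char :=
  let cube_pos : List Int := ((PySem.List.enumerate s 0).filter (fun p => p.2 == '#')).map (·.1)
  ((List.zipWith (pvTiltFwdSeg s)
      ((0 : Int) :: cube_pos.map (· + 1))
      (cube_pos ++ [(s.length : Int)])).flatten).flatten

-- seq[::-1] is List.reverse (exact: PySem.List.slice?_none_none_neg_one); the recursive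
-- call tilt_seq(True, …) is the forward branch, kept as the helper pvTiltFwdA.
def tilt_seq (forward : Bool) (seq : String) : String :=
  if forward then String.ofList (pvTiltFwdA seq.toList)
  else String.ofList ((pvTiltFwdA seq.toList.reverse).reverse)

-- ===== PORT B =====
-- loop body of B's single pass: state (out, empties, rounds)
def pvTiltStep (st : List Char × Nat × Nat) (c : Char) : List Char × Nat × Nat :=
  match st with
  | (out, e, r) =>
    if c = '#' then (out ++ (List.replicate e '.' ++ List.replicate r 'O' ++ ['#']), 0, 0)
    else if c = 'O' then (out, e, r + 1)
    else (out, e + 1, r)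

-- forward branch of B: fold the pass, then flush the last segment
def pvTiltFwdB (s : List Char) : List Char :=
  match s.foldl pvTiltStep ([], 0, 0) with
  | (out, e, r) => out ++ (List.replicate e '.' ++ List.replicate r 'O')

def tilt_seq_alt (forward : Bool) (seq : String) : String :=
  if forward then String.ofList (pvTiltFwdB seq.toList)
  else String.ofList ((pvTiltFwdB seq.toList.reverse).reverse)

-- ===== PRECONDITION & SPEC =====
def Spec_tilt_seq (forward : Bool) (seq : String) (out : String) : Prop := out = tilt_seq_alt forward seq
instance (forward : Bool) (seq : String) (out : String) : Decidable (Spec_tilt_seq forward seq out) := by unfold Spec_tilt_seq; infer_instance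

-- ===== CLAIM (what is proved, stated in full; the proofs are below) =====
def Claim_equal_tilt_seq : Prop := ∀ (forward : Bool) (seq : String), Dom_tilt_seq forward seq → Spec_tilt_seq forward seq (tilt_seq forward seq)

-- ===== LEMMAS AND PROOFS =====

-- what one cube-free segment tilts to
def pvSeg (s : List Char) : List Char :=
  List.replicate (s.length - s.count 'O') '.' ++ List.replicate (s.count 'O') 'O'

-- A's segment function over Nat indices
def pvSegN (s : List Char) (x y : Nat) : List (List Char) :=
  pvTiltFwdSeg s (x : Int) (y : Int)

-- cube positions, at the Nat level
def pvCpN : List Char → List Nat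
  | [] => []
  | c :: t => (if c = '#' then [0] else []) ++ (pvCpN t).map (· + 1)

theorem pvCpN_free {s : List Char} (h : '#' ∉ s) : pvCpN s = [] := by
  induction s with
  | nil => rfl
  | cons c t ih =>
      have hc : ¬ (c = '#') := fun hc => h (hc ▸ List.mem_cons_self)
      simp only [pvCpN, hc, if_false, List.nil_append,
        ih (fun hm => h (List.mem_cons_of_mem _ hm)), List.map_nil]

theorem pvCpN_split {a : List Char} (b : List Char) (h : '#' ∉ a) :
    pvCpN (a ++ '#' :: b) = a.length :: (pvCpN b).map (· + (a.length + 1)) := by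
  induction a with
  | nil => simp [pvCpN]
  | cons c t ih =>
      have hc : ¬ (c = '#') := fun hc => h (hc ▸ List.mem_cons_self)
      simp only [List.cons_append, pvCpN, hc, if_false, List.nil_append,
        ih (fun hm => h (List.mem_cons_of_mem _ hm)), List.map_cons, List.map_map,
        List.length_cons]
      refine congrArg₂ List.cons (by omega) ?_
      exact List.map_congr_left (fun x _ => by simp only [Function.comp_apply]; omega)

-- A's cube_pos comprehension, generalized over the enumerate start
theorem pvCp_eq (s : List Char) (k : Nat) :
    ((PySem.List.enumerate s (k : Int)).filter (fun p => p.2 == '#')).map (·.1)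
      = (pvCpN s).map (fun m => ((m + k : Nat) : Int)) := by
  induction s generalizing k with
  | nil => simp [PySem.List.enumerate_nil, pvCpN]
  | cons c t ih =>
      rw [PySem.List.enumerate_cons, List.filter_cons]
      have hk1 : ((k : Int) + 1) = ((k + 1 : Nat) : Int) := by push_cast; ring
      by_cases hc : c = '#'
      · have hbe : ((((k : Int), c)).2 == '#') = true := by simp [hc]
        rw [hbe, if_pos rfl, List.map_cons, hk1, ih (k + 1)]
        simp only [pvCpN, hc, if_pos, List.singleton_append, List.map_cons, List.map_map]
        refine congrArg₂ List.cons (by push_cast; ring) ?_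
        exact List.map_congr_left (fun x _ => by
          simp only [Function.comp_apply]; push_cast; ring)
      · have hbe : ((((k : Int), c)).2 == '#') = false := by simp [hc]
        rw [hbe, if_neg (by simp), hk1, ih (k + 1)]
        simp only [pvCpN, hc, if_false, List.nil_append, List.map_map]
        exact List.map_congr_left (fun x _ => by
          simp only [Function.comp_apply]; push_cast; ring)

def pvCast (m : Nat) : Int := m

theorem pvCp0 (s : List Char) :
    ((PySem.List.enumerate s 0).filter (fun p => p.2 == '#')).map (·.1)
      = (pvCpN s).map pvCast := by
  have h := pvCp_eq s 0
  rw [Nat.cast_zero] at h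
  rw [h]
  exact List.map_congr_left (fun x _ => by simp [pvCast])

-- A's forward branch, rewritten over the Nat-level index lists
theorem pvA_eq (s : List Char) :
    pvTiltFwdA s
      = ((List.zipWith (pvSegN s)
            (0 :: (pvCpN s).map (· + 1))
            (pvCpN s ++ [s.length])).flatten).flatten := by
  simp only [pvTiltFwdA]
  rw [pvCp0]
  have h1 : (0 : Int) :: ((pvCpN s).map pvCast).map (· + 1)
      = (0 :: (pvCpN s).map (· + 1)).map pvCast := by
    simp only [List.map_cons, List.map_map]
    refine congrArg₂ List.cons (by simp [pvCast]) ?_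
    exact List.map_congr_left (fun x _ => by
      simp only [Function.comp_apply, pvCast]; push_cast; ring)
  have h2 : (pvCpN s).map pvCast ++ [(s.length : Int)]
      = ((pvCpN s) ++ [s.length]).map pvCast := by
    rw [List.map_append, List.map_cons, List.map_nil]
    rfl
  rw [h1, h2, List.zipWith_map]
  rfl

-- shifting both indices past an "a ++ '#' ::" prefix
theorem pvSeg_shift (a b : List Char) (x y : Nat) :
    pvSegN (a ++ '#' :: b) (x + (a.length + 1)) (y + (a.length + 1)) = pvSegN b x y := by
  simp only [pvSegN, pvTiltFwdSeg]
  have hdrop : (a ++ '#' :: b).drop (x + (a.length + 1)) = b.drop x := by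
    have h1 : x + (a.length + 1) = a.length + (x + 1) := by omega
    rw [h1, List.drop_length_add_append, List.drop_succ_cons]
  rw [PySem.List.slice_natCast, PySem.List.slice_natCast, hdrop]
  have hsub : y + (a.length + 1) - (x + (a.length + 1)) = y - x := by omega
  rw [hsub]
  have hne : (decide ((((y + (a.length + 1) : Nat)) : Int) < (((a ++ '#' :: b).length : Int))))
      = decide ((y : Int) < ((b).length : Int)) := by
    apply decide_eq_decide.mpr
    rw [List.length_append, List.length_cons]
    push_cast; omega
  rw [hne]
  have harith : (((y + (a.length + 1) : Nat)) : Int) - (((x + (a.length + 1) : Nat)) : Int)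
      = (y : Int) - (x : Int) := by push_cast; ring
  rw [harith]

-- the zipped tail of a split list is the zip over the suffix
theorem pvZip_shift (a b : List Char) (xs ys : List Nat) :
    List.zipWith (pvSegN (a ++ '#' :: b))
        (xs.map (· + (a.length + 1))) (ys.map (· + (a.length + 1)))
      = List.zipWith (pvSegN b) xs ys := by
  rw [List.zipWith_map]
  rw [show (fun (p q : Nat) => pvSegN (a ++ '#' :: b) (p + (a.length + 1)) (q + (a.length + 1)))
      = pvSegN b from funext fun p => funext fun q => pvSeg_shift a b p q]

-- the first segment of a split list
theorem pvSeg_first (a b : List Char) :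
    pvSegN (a ++ '#' :: b) 0 a.length
      = [List.replicate (a.length - a.count 'O') '.', List.replicate (a.count 'O') 'O', ['#']] := by
  simp only [pvSegN, pvTiltFwdSeg]
  have hsl : PySem.List.slice (a ++ '#' :: b) (some ((0 : Nat) : Int)) (some ((a.length : Nat) : Int)) = a := by
    rw [PySem.List.slice_natCast]
    simp
  rw [hsl]
  simp [PySem.List.pyRepeat_singleton]

-- the single segment of a cube-free list
theorem pvSeg_whole (s : List Char) :
    pvSegN s 0 s.length
      = [List.replicate (s.length - s.count 'O') '.', List.replicate (s.count 'O') 'O', []] := by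
  simp only [pvSegN, pvTiltFwdSeg]
  have hsl : PySem.List.slice s (some ((0 : Nat) : Int)) (some ((s.length : Nat) : Int)) = s := by
    rw [PySem.List.slice_natCast]; simp
  rw [hsl]
  simp [PySem.List.pyRepeat_singleton]

theorem pvA_free {s : List Char} (h : '#' ∉ s) : pvTiltFwdA s = pvSeg s := by
  rw [pvA_eq, pvCpN_free h]
  simp only [List.map_nil, List.nil_append, List.zipWith_cons_cons, List.zipWith_nil_right,
    List.flatten_cons, List.flatten_nil, List.append_nil]
  rw [pvSeg_whole]
  simp [pvSeg]

theorem pvA_split (a b : List Char) (h : '#' ∉ a) :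
    pvTiltFwdA (a ++ '#' :: b) = pvSeg a ++ '#' :: pvTiltFwdA b := by
  rw [pvA_eq, pvCpN_split b h]
  -- rewrite the index lists as shifted copies of b's index lists
  have hstarts : (0 :: (a.length :: (pvCpN b).map (· + (a.length + 1))).map (· + 1))
      = 0 :: ((0 :: (pvCpN b).map (· + 1)).map (· + (a.length + 1))) := by
    simp only [List.map_cons, List.map_map, Nat.zero_add]
    refine congrArg (List.cons 0) (congrArg₂ List.cons (by omega) ?_)
    exact List.map_congr_left (fun x _ => by simp only [Function.comp_apply]; omega)
  have hends : ((a.length :: (pvCpN b).map (· + (a.length + 1))) ++ [(a ++ '#' :: b).length])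
      = a.length :: (((pvCpN b) ++ [b.length]).map (· + (a.length + 1))) := by
    simp only [List.cons_append, List.map_append, List.map_cons, List.map_nil,
      List.length_append, List.length_cons]
    refine congrArg₂ List.cons rfl (congrArg₂ _ rfl (congrArg₂ List.cons (by omega) rfl))
  rw [hstarts, hends, List.zipWith_cons_cons, pvZip_shift a b, pvSeg_first a b]
  rw [List.flatten_cons, List.flatten_append, pvA_eq b]
  simp [pvSeg, List.append_assoc]

-- B-side: folding over a cube-free list only bumps the counters
theorem pvB_free_fold {s : List Char} (h : '#' ∉ s) (out : List Char) (e r : Nat) :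
    s.foldl pvTiltStep (out, e, r) = (out, e + (s.length - s.count 'O'), r + s.count 'O') := by
  induction s generalizing e r with
  | nil => simp
  | cons c t ih =>
      have hc : ¬ (c = '#') := fun hc => h (hc ▸ List.mem_cons_self)
      have ht : '#' ∉ t := fun hm => h (List.mem_cons_of_mem _ hm)
      have hcle : t.count 'O' ≤ t.length := List.count_le_length
      rw [List.foldl_cons]
      by_cases ho : c = 'O'
      · rw [show pvTiltStep (out, e, r) c = (out, e, r + 1) from by simp [pvTiltStep, ho]]
        rw [ih ht]
        have h1 : (c :: t).count 'O' = t.count 'O' + 1 := by simp [ho]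
        have h2 : (c :: t).length = t.length + 1 := rfl
        rw [h1, h2]
        refine congrArg (Prod.mk out) (congrArg₂ Prod.mk (by omega) (by omega))
      · rw [show pvTiltStep (out, e, r) c = (out, e + 1, r) from by simp [pvTiltStep, hc, ho]]
        rw [ih ht]
        have h1 : (c :: t).count 'O' = t.count 'O' := by simp [ho]
        have h2 : (c :: t).length = t.length + 1 := rfl
        rw [h1, h2]
        refine congrArg (Prod.mk out) (congrArg₂ Prod.mk (by omega) (by omega))

-- the accumulated output factors out of the fold
theorem pvB_out_fold (s : List Char) (out : List Char) (e r : Nat) :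
    s.foldl pvTiltStep (out, e, r)
      = (out ++ (s.foldl pvTiltStep ([], e, r)).1,
         (s.foldl pvTiltStep ([], e, r)).2.1, (s.foldl pvTiltStep ([], e, r)).2.2) := by
  induction s generalizing out e r with
  | nil => simp
  | cons c t ih =>
      rw [List.foldl_cons, List.foldl_cons]
      by_cases h1 : c = '#'
      · rw [show pvTiltStep (out, e, r) c
            = (out ++ (List.replicate e '.' ++ List.replicate r 'O' ++ ['#']), 0, 0) from by
              simp [pvTiltStep, h1]]
        rw [show pvTiltStep (([] : List Char), e, r) c
            = ((List.replicate e '.' ++ List.replicate r 'O' ++ ['#']), 0, 0) from by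
              simp [pvTiltStep, h1]]
        rw [ih, ih (List.replicate e '.' ++ List.replicate r 'O' ++ ['#']) 0 0]
        simp [List.append_assoc]
      · by_cases h2 : c = 'O'
        · rw [show pvTiltStep (out, e, r) c = (out, e, r + 1) from by simp [pvTiltStep, h2]]
          rw [show pvTiltStep (([] : List Char), e, r) c = (([] : List Char), e, r + 1) from by
            simp [pvTiltStep, h2]]
          exact ih out e (r + 1)
        · rw [show pvTiltStep (out, e, r) c = (out, e + 1, r) from by simp [pvTiltStep, h1, h2]]
          rw [show pvTiltStep (([] : List Char), e, r) c = (([] : List Char), e + 1, r) from by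
            simp [pvTiltStep, h1, h2]]
          exact ih out (e + 1) r

theorem pvB_free {s : List Char} (h : '#' ∉ s) : pvTiltFwdB s = pvSeg s := by
  unfold pvTiltFwdB
  rw [pvB_free_fold h]
  simp [pvSeg]

theorem pvB_split (a b : List Char) (h : '#' ∉ a) :
    pvTiltFwdB (a ++ '#' :: b) = pvSeg a ++ '#' :: pvTiltFwdB b := by
  unfold pvTiltFwdB
  rw [List.foldl_append, pvB_free_fold h, List.foldl_cons]
  rw [show pvTiltStep (([] : List Char), 0 + (a.length - a.count 'O'), 0 + a.count 'O') '#'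
      = ((List.replicate (0 + (a.length - a.count 'O')) '.'
          ++ List.replicate (0 + a.count 'O') 'O' ++ ['#']), 0, 0) from by simp [pvTiltStep]]
  rw [pvB_out_fold b _ 0 0]
  cases hb : b.foldl pvTiltStep (([] : List Char), 0, 0) with
  | mk o er =>
      simp [pvSeg, List.append_assoc]

theorem pvMainAux : ∀ (n : Nat) (s : List Char), s.length ≤ n → pvTiltFwdA s = pvTiltFwdB s := by
  intro n
  induction n with
  | zero =>
      intro s hs
      have hnil : s = [] := List.eq_nil_of_length_eq_zero (Nat.le_zero.mp hs)
      subst hnil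
      rw [pvA_free (by simp), pvB_free (by simp)]
  | succ n ih =>
      intro s hs
      by_cases h : '#' ∈ s
      · have hsp : s.takeWhile (fun c => c != '#') ++ s.dropWhile (fun c => c != '#') = s :=
          List.takeWhile_append_dropWhile
        have ha : '#' ∉ s.takeWhile (fun c => c != '#') := by
          intro hm
          have := List.mem_takeWhile_imp hm
          simp at this
        have hd : s.dropWhile (fun c => c != '#') ≠ [] := by
          intro he
          rw [List.dropWhile_eq_nil_iff] at he
          have := he '#' h
          simp at this
        obtain ⟨c, t, hct⟩ := List.exists_cons_of_ne_nil hd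
        have hc : c = '#' := by
          have hh := List.head_dropWhile_not (fun c => c != '#') (l := s) hd
          have hhead : (s.dropWhile (fun c => c != '#')).head hd = c := by
            simp [hct]
          rw [hhead] at hh
          simpa using hh
        subst hc
        have hseq : s = s.takeWhile (fun c => c != '#') ++ '#' :: t := by
          conv_lhs => rw [← hsp, hct]
        have hlt : t.length ≤ n := by
          have hl : s.length = (s.takeWhile (fun c => c != '#')).length + (t.length + 1) := by
            conv_lhs => rw [hseq]
            simp [List.length_append]
          omega
        rw [hseq, pvA_split _ _ ha, pvB_split _ _ ha, ih t hlt]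
      · rw [pvA_free h, pvB_free h]

theorem pvMain (s : List Char) : pvTiltFwdA s = pvTiltFwdB s :=
  pvMainAux s.length s le_rfl

-- ===== VERDICT (by name: the statement is the Claim_ definition above) =====
theorem tilt_seq_spec : Claim_equal_tilt_seq := by
  intro forward seq _
  unfold Spec_tilt_seq tilt_seq tilt_seq_alt
  cases forward <;> simp [pvMain]
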